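-- pv_equiv track=rewrite | github.com/ifyij/Programming-Labs | lab10.py | surrounding_locs
-- ===== SOURCE A (Python) =====
-- direction_vector = {
--     "up": (-1, 0),
--     "down": (+1, 0),
--     "left": (0, -1),
--     "right": (0, +1),
-- }
--
-- def in_bounds(dimensions,position):
--     """
--     Given: dimensions (a tuple) and a coordinate that is a tuple
--     returns boolean whether it is in bounds
--
--     """
--     height = dimensions[0]
--     width = dimensions[1]
--     if 0 <= position[0] < height and 0 <= position[1] < width:
--         return True
--     return False
--
-- def surrounding_locs(dimensions, is_location):
--     """
--     Given: dimension and a location of is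
--     returns a dictionary with the keyboard direction as keys and a list of all the coords outward in that direction as the list
--
--     """
--     ans = {
--         "up": [],
--         "down": [],
--         "left": [],
--         "right": [],
--     }
--     for key in direction_vector:
--         curr_loc = (is_location[0]+direction_vector[key][0],is_location[1]+direction_vector[key][1])
--         while in_bounds(dimensions, curr_loc):
--             ans[key].append(curr_loc)
--             curr_loc = (curr_loc[0]+direction_vector[key][0],curr_loc[1]+direction_vector[key][1])
--     return ans
-- ===== SOURCE B (Python) =====
-- def in_bounds(dimensions, position):
--     return 0 <= position[0] < dimensions[0] and 0 <= position[1] < dimensions[1]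
--
-- def surrounding_locs(dimensions, is_location):
--     h, w = dimensions
--     r, c = is_location
--     up = [(i, c) for i in range(r - 1, -1, -1)] if in_bounds(dimensions, (r - 1, c)) else []
--     down = [(i, c) for i in range(r + 1, h)] if in_bounds(dimensions, (r + 1, c)) else []
--     left = [(r, j) for j in range(c - 1, -1, -1)] if in_bounds(dimensions, (r, c - 1)) else []
--     right = [(r, j) for j in range(c + 1, w)] if in_bounds(dimensions, (r, c + 1)) else []
--     return {"up": up, "down": down, "left": left, "right": right}
-- ===== Notes on version B (the rewrite author's own statement) =====
-- stated objective: simpler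
-- what changed: Replaces the step-by-step while-walk (a bounds check per visited cell) by a single bounds check on the first neighbouring cell followed by a direct range comprehension out to the grid edge for each direction.
import Mathlib
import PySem

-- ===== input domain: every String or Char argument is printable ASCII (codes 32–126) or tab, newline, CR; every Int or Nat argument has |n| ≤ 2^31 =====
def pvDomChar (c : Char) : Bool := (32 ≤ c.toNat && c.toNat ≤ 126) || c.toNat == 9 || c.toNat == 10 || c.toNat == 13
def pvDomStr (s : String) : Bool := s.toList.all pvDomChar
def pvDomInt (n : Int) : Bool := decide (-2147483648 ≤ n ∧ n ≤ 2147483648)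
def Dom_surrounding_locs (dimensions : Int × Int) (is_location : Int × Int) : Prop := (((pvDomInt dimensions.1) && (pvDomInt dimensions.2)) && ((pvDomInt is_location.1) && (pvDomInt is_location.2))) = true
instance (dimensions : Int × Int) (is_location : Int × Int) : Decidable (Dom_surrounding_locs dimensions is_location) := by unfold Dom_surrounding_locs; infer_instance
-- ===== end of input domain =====

-- B replaces A's step-by-step while-walk in each direction by one bounds test on the first
-- neighbouring cell followed by a direct range comprehension to the grid edge (simpler).


-- ===== PORT A =====
def in_bounds (dimensions : Int × Int) (position : Int × Int) : Bool :=
  decide (0 ≤ position.1 ∧ position.1 < dimensions.1 ∧ 0 ≤ position.2 ∧ position.2 < dimensions.2)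

-- A's while-loop, stepping by the direction vector; fuel is only a totality guard
-- (a straight in-bounds walk takes at most max(h,w) ≤ h.toNat + w.toNat steps, see surrounding_locs).
def pvWalk (dimensions : Int × Int) (d : Int × Int) : Nat → Int × Int → List (Int × Int)
  | 0, _ => []
  | n + 1, cur =>
      if in_bounds dimensions cur then
        cur :: pvWalk dimensions d n (cur.1 + d.1, cur.2 + d.2)
      else []

def surrounding_locs (dimensions : Int × Int) (is_location : Int × Int) : List (String × List (Int × Int)) :=
  let fuel := dimensions.1.toNat + dimensions.2.toNat + 1
  [ ("up",    pvWalk dimensions (-1, 0) fuel (is_location.1 - 1, is_location.2)),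
    ("down",  pvWalk dimensions (1, 0)  fuel (is_location.1 + 1, is_location.2)),
    ("left",  pvWalk dimensions (0, -1) fuel (is_location.1, is_location.2 - 1)),
    ("right", pvWalk dimensions (0, 1)  fuel (is_location.1, is_location.2 + 1)) ]

-- ===== PORT B =====
def in_grid (dimensions : Int × Int) (position : Int × Int) : Bool :=
  decide (0 ≤ position.1 ∧ position.1 < dimensions.1 ∧ 0 ≤ position.2 ∧ position.2 < dimensions.2)

def surrounding_locs_alt (dimensions : Int × Int) (is_location : Int × Int) : List (String × List (Int × Int)) :=
  let h := dimensions.1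
  let w := dimensions.2
  let r := is_location.1
  let c := is_location.2
  let up := if in_grid dimensions (r - 1, c) then
      (PySem.List.pyRange (r - 1) (-1) (-1)).map (fun i => (i, c)) else []
  let down := if in_grid dimensions (r + 1, c) then
      (PySem.List.pyRange (r + 1) h 1).map (fun i => (i, c)) else []
  let left := if in_grid dimensions (r, c - 1) then
      (PySem.List.pyRange (c - 1) (-1) (-1)).map (fun j => (r, j)) else []
  let right := if in_grid dimensions (r, c + 1) then
      (PySem.List.pyRange (c + 1) w 1).map (fun j => (r, j)) else []
  [ ("up", up), ("down", down), ("left", left), ("right", right) ]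

-- ===== PRECONDITION & SPEC =====
def Spec_surrounding_locs (dimensions : Int × Int) (is_location : Int × Int) (out : List (String × List (Int × Int))) : Prop := out = surrounding_locs_alt dimensions is_location
instance (dimensions : Int × Int) (is_location : Int × Int) (out : List (String × List (Int × Int))) : Decidable (Spec_surrounding_locs dimensions is_location out) := by unfold Spec_surrounding_locs; infer_instance

-- ===== CLAIM (what is proved, stated in full; the proofs are below) =====
def Claim_equal_surrounding_locs : Prop := ∀ (dimensions : Int × Int) (is_location : Int × Int), Dom_surrounding_locs dimensions is_location → Spec_surrounding_locs dimensions is_location (surrounding_locs dimensions is_location)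

-- ===== LEMMAS AND PROOFS =====

-- A's upward walk from an in-grid cell (i, c) collects i, i-1, …, 0.
lemma pvWalk_up (h w c : Int) (hc : 0 ≤ c ∧ c < w) :
    ∀ (fuel : Nat) (i : Int), i < h → i.toNat < fuel →
      pvWalk (h, w) (-1, 0) fuel (i, c) = (PySem.List.pyRange i (-1) (-1)).map (fun j => (j, c)) := by
  intro fuel
  induction fuel with
  | zero => intro i _ hf; omega
  | succ n ih =>
    intro i hi hf
    by_cases h0 : 0 ≤ i
    · have hb : in_bounds (h, w) (i, c) = true := by
        simp [in_bounds]; omega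
      simp only [pvWalk, hb, if_pos]
      rw [PySem.List.pyRange_neg_one_cons (by omega : (-1 : Int) < i)]
      have e1 : i + -1 = i - 1 := by ring
      have e2 : c + 0 = c := by ring
      by_cases h1 : 0 ≤ i - 1
      · rw [e1, e2, ih (i - 1) (by omega) (by omega)]
        simp
      · have hi0 : i = 0 := by omega
        subst hi0
        have e : pvWalk (h, w) (-1, 0) n (0 + -1, c + 0) = [] := by
          cases n with
          | zero => rfl
          | succ m => simp [pvWalk, in_bounds]
        rw [e]
        rw [PySem.List.pyRange_neg_one_eq_nil (by omega)]
        simp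
    · have hb : in_bounds (h, w) (i, c) = false := by
        simp [in_bounds]; omega
      simp only [pvWalk, hb]
      rw [PySem.List.pyRange_neg_one_eq_nil (by omega)]
      simp

-- A's downward walk from an in-grid cell (i, c) collects i, i+1, …, h-1.
lemma pvWalk_down (h w c : Int) (hc : 0 ≤ c ∧ c < w) :
    ∀ (fuel : Nat) (i : Int), 0 ≤ i → (h - i).toNat < fuel →
      pvWalk (h, w) (1, 0) fuel (i, c) = (PySem.List.pyRange i h 1).map (fun j => (j, c)) := by
  intro fuel
  induction fuel with
  | zero => intro i _ hf; omega
  | succ n ih =>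
    intro i h0 hf
    by_cases hi : i < h
    · have hb : in_bounds (h, w) (i, c) = true := by
        simp [in_bounds]; omega
      simp only [pvWalk, hb, if_pos]
      rw [PySem.List.pyRange_one_cons (by omega : i < h)]
      have e2 : c + 0 = c := by ring
      rw [e2, ih (i + 1) (by omega) (by omega)]
      simp
    · have hb : in_bounds (h, w) (i, c) = false := by
        simp [in_bounds]; omega
      simp only [pvWalk, hb]
      rw [PySem.List.pyRange_one_eq_nil (by omega)]
      simp

-- swapping both coordinates turns a vertical walk into a horizontal one
lemma pvWalk_swap (dims d : Int × Int) :
    ∀ (fuel : Nat) (cur : Int × Int),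
      pvWalk (dims.1, dims.2) (d.1, d.2) fuel (cur.1, cur.2)
        = (pvWalk (dims.2, dims.1) (d.2, d.1) fuel (cur.2, cur.1)).map (fun p => (p.2, p.1)) := by
  intro fuel
  induction fuel with
  | zero => intro cur; rfl
  | succ n ih =>
    intro cur
    by_cases hb : in_bounds (dims.1, dims.2) (cur.1, cur.2) = true
    · have hb' : in_bounds (dims.2, dims.1) (cur.2, cur.1) = true := by
        simp [in_bounds] at hb ⊢; tauto
      simp only [pvWalk, hb, hb', if_pos, List.map_cons]
      exact congrArg _ (ih (cur.1 + d.1, cur.2 + d.2))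
    · have hb' : in_bounds (dims.2, dims.1) (cur.2, cur.1) = false := by
        simp [in_bounds] at hb ⊢; omega
      simp only [pvWalk, hb', eq_false_of_ne_true hb]
      simp

lemma up_eq (h w r c : Int) :
    pvWalk (h, w) (-1, 0) (h.toNat + w.toNat + 1) (r - 1, c)
      = if in_grid (h, w) (r - 1, c) then (PySem.List.pyRange (r - 1) (-1) (-1)).map (fun i => (i, c)) else [] := by
  by_cases hg : 0 ≤ r - 1 ∧ r - 1 < h ∧ 0 ≤ c ∧ c < w
  · have hg' : in_grid (h, w) (r - 1, c) = true := by simp [in_grid]; omega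
    rw [hg', if_pos rfl]
    exact pvWalk_up h w c ⟨hg.2.2.1, hg.2.2.2⟩ _ (r - 1) hg.2.1 (by omega)
  · have hg' : in_grid (h, w) (r - 1, c) = false := by simp [in_grid]; omega
    have hb : in_bounds (h, w) (r - 1, c) = false := by simp [in_bounds]; omega
    simp [pvWalk, hb, hg']

lemma down_eq (h w r c : Int) :
    pvWalk (h, w) (1, 0) (h.toNat + w.toNat + 1) (r + 1, c)
      = if in_grid (h, w) (r + 1, c) then (PySem.List.pyRange (r + 1) h 1).map (fun i => (i, c)) else [] := by
  by_cases hg : 0 ≤ r + 1 ∧ r + 1 < h ∧ 0 ≤ c ∧ c < w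
  · have hg' : in_grid (h, w) (r + 1, c) = true := by simp [in_grid]; omega
    rw [hg', if_pos rfl]
    exact pvWalk_down h w c ⟨hg.2.2.1, hg.2.2.2⟩ _ (r + 1) hg.1 (by omega)
  · have hg' : in_grid (h, w) (r + 1, c) = false := by simp [in_grid]; omega
    have hb : in_bounds (h, w) (r + 1, c) = false := by simp [in_bounds]; omega
    simp [pvWalk, hb, hg']

lemma in_grid_swap (h w x y : Int) : in_grid (w, h) (y, x) = in_grid (h, w) (x, y) := by
  simp only [in_grid, decide_eq_decide]
  tauto

lemma left_eq (h w r c : Int) :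
    pvWalk (h, w) (0, -1) (h.toNat + w.toNat + 1) (r, c - 1)
      = if in_grid (h, w) (r, c - 1) then (PySem.List.pyRange (c - 1) (-1) (-1)).map (fun j => (r, j)) else [] := by
  have hs := pvWalk_swap (h, w) (0, -1) (h.toNat + w.toNat + 1) (r, c - 1)
  simp only at hs
  rw [hs]
  have hw : w.toNat + h.toNat + 1 = h.toNat + w.toNat + 1 := by omega
  rw [← hw, up_eq w h c r, in_grid_swap]
  by_cases hg : in_grid (h, w) (r, c - 1) = true
  · simp [hg, List.map_map, Function.comp]
  · simp [eq_false_of_ne_true hg]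

lemma right_eq (h w r c : Int) :
    pvWalk (h, w) (0, 1) (h.toNat + w.toNat + 1) (r, c + 1)
      = if in_grid (h, w) (r, c + 1) then (PySem.List.pyRange (c + 1) w 1).map (fun j => (r, j)) else [] := by
  have hs := pvWalk_swap (h, w) (0, 1) (h.toNat + w.toNat + 1) (r, c + 1)
  simp only at hs
  rw [hs]
  have hw : w.toNat + h.toNat + 1 = h.toNat + w.toNat + 1 := by omega
  rw [← hw, down_eq w h c r, in_grid_swap]
  by_cases hg : in_grid (h, w) (r, c + 1) = true
  · simp [hg, List.map_map, Function.comp]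
  · simp [eq_false_of_ne_true hg]

-- ===== VERDICT (by name: the statement is the Claim_ definition above) =====
theorem surrounding_locs_spec : Claim_equal_surrounding_locs := by
  intro dims loc _
  unfold Spec_surrounding_locs
  obtain ⟨h, w⟩ := dims
  obtain ⟨r, c⟩ := loc
  simp only [surrounding_locs, surrounding_locs_alt]
  rw [up_eq, down_eq, left_eq, right_eq]
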